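-- pv_equiv track=rewrite | github.com/totorus/Worldforge | backend/app/narrator/json_utils.py | _remove_stray_brackets
-- ===== SOURCE A (Python) =====
-- def _remove_stray_brackets(text: str) -> str:
--     """Remove unmatched closing brackets/braces from JSON text.
--
--     LLMs sometimes add extra ] or } that don't match any opening bracket.
--     This walks the text (respecting strings) and removes unmatched closers.
--     """
--     # First pass: find matched pairs
--     stack = []
--     in_string = False
--     escape = False
--     matched_openers = set()
--     matched_closers = set()
--
--     for i, ch in enumerate(text):
--         if escape:
--             escape = False
--             continue
--         if ch == '\\' and in_string:
--             escape = True
--             continue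
--         if ch == '"':
--             in_string = not in_string
--             continue
--         if in_string:
--             continue
--         if ch in '{[':
--             stack.append(i)
--         elif ch in '}]':
--             expected = '}' if ch == '}' else ']'
--             # Find matching opener
--             if stack:
--                 opener_pos = stack.pop()
--                 opener_ch = text[opener_pos]
--                 expected_closer = '}' if opener_ch == '{' else ']'
--                 if ch == expected_closer:
--                     matched_openers.add(opener_pos)
--                     matched_closers.add(i)
--                 else:
--                     # Mismatched — this closer is stray, push opener back
--                     stack.append(opener_pos)
--
--     # Second pass: rebuild without unmatched closers
--     result = []
--     in_string = False
--     escape = False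
--     for i, ch in enumerate(text):
--         if escape:
--             escape = False
--             result.append(ch)
--             continue
--         if ch == '\\' and in_string:
--             escape = True
--             result.append(ch)
--             continue
--         if ch == '"':
--             in_string = not in_string
--             result.append(ch)
--             continue
--         if in_string:
--             result.append(ch)
--             continue
--         if ch in '}]' and i not in matched_closers:
--             # Skip stray closer
--             continue
--         result.append(ch)
--
--     return ''.join(result)
-- ===== SOURCE B (Python) =====
-- def _remove_stray_brackets(text: str) -> str:
--     """Single pass: keep a stack of opener chars; drop closers that don't
--     match the top of the stack (on mismatch the opener stays)."""
--     out = []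
--     stack = []
--     in_string = False
--     escape = False
--     for ch in text:
--         if escape:
--             escape = False
--             out.append(ch)
--             continue
--         if ch == '\\' and in_string:
--             escape = True
--             out.append(ch)
--             continue
--         if ch == '"':
--             in_string = not in_string
--             out.append(ch)
--             continue
--         if in_string:
--             out.append(ch)
--             continue
--         if ch in '{[':
--             stack.append(ch)
--             out.append(ch)
--             continue
--         if ch in '}]':
--             if stack and (('}' if stack[-1] == '{' else ']') == ch):
--                 stack.pop()
--                 out.append(ch)
--             # else: stray closer, skip (opener stays on the stack)
--             continue
--         out.append(ch)
--     return ''.join(out)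
-- ===== Notes on version B (the rewrite author's own statement) =====
-- stated objective: simpler
-- what changed: Replaces A's two scans (first building positions-stack + matched-closer index set, then rebuilding while consulting that set) with one fused pass that keeps a stack of opener characters and decides each closer on the spot.
import Mathlib
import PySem

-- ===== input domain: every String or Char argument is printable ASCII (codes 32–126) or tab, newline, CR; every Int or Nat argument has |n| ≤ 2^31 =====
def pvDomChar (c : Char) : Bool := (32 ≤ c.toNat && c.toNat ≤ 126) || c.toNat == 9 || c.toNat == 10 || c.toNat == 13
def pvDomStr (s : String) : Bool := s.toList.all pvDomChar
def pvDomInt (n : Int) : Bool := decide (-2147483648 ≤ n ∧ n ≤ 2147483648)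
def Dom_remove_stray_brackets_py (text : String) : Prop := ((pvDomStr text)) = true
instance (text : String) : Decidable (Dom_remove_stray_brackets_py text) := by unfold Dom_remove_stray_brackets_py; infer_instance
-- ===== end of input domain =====

-- B is one fused pass (stack of opener chars, closers decided on the spot) instead of
-- A's two scans with a matched-closer index set; same return value, objective: simpler.

-- ===== PORT A =====
-- 'for i, ch in enumerate(text)' is ported over an explicitly indexed suffix.
def pvEnumFrom {α : Type} : Nat → List α → List (Nat × α)
  | _, [] => []
  | n, a :: l => (n, a) :: pvEnumFrom (n + 1) l

-- First pass of A: returns matched_closers (a set of indices; matched_openers is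
-- built by A but never read, so it is not carried). text[opener_pos] is in range by
-- construction (positions come from enumerate), so getD ' ' equals Python's text[opener_pos].
def pvAFirst (tl : List Char) : List (Nat × Char) → List Nat → Bool → Bool →
    PySem.Set Nat → PySem.Set Nat
  | [], _, _, _, closers => closers
  | (i, ch) :: rest, stack, inS, esc, closers =>
    if esc then pvAFirst tl rest stack inS false closers
    else if ch = '\\' ∧ inS = true then pvAFirst tl rest stack inS true closers
    else if ch = '"' then pvAFirst tl rest stack (!inS) esc closers
    else if inS then pvAFirst tl rest stack inS esc closers
    else if ch = '{' ∨ ch = '[' then pvAFirst tl rest (i :: stack) inS esc closers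
    else if ch = '}' ∨ ch = ']' then
      match stack with
      | [] => pvAFirst tl rest [] inS esc closers
      | p :: s' =>
        let openerCh := tl.getD p ' '
        let expectedCloser := if openerCh = '{' then '}' else ']'
        if ch = expectedCloser then pvAFirst tl rest s' inS esc (PySem.Set.add closers i)
        else pvAFirst tl rest (p :: s') inS esc closers
    else pvAFirst tl rest stack inS esc closers

-- Second pass of A: rebuild, skipping closers not in matched_closers.
def pvASecond (closers : PySem.Set Nat) : List (Nat × Char) → Bool → Bool →
    List Char → List Char
  | [], _, _, acc => acc.reverse
  | (i, ch) :: rest, inS, esc, acc =>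
    if esc then pvASecond closers rest inS false (ch :: acc)
    else if ch = '\\' ∧ inS = true then pvASecond closers rest inS true (ch :: acc)
    else if ch = '"' then pvASecond closers rest (!inS) esc (ch :: acc)
    else if inS then pvASecond closers rest inS esc (ch :: acc)
    else if (ch = '}' ∨ ch = ']') ∧ ¬ i ∈ closers then pvASecond closers rest inS esc acc
    else pvASecond closers rest inS esc (ch :: acc)

def remove_stray_brackets_py (text : String) : String :=
  let tl := text.toList
  let closers := pvAFirst tl (pvEnumFrom 0 tl) [] false false PySem.Set.empty
  String.ofList (pvASecond closers (pvEnumFrom 0 tl) false false [])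

-- ===== PORT B =====
-- One pass: stack of opener characters; a closer is kept iff it matches the top.
def pvBGo : List Char → List Char → Bool → Bool → List Char → List Char
  | [], _, _, _, acc => acc.reverse
  | ch :: rest, stack, inS, esc, acc =>
    if esc then pvBGo rest stack inS false (ch :: acc)
    else if ch = '\\' ∧ inS = true then pvBGo rest stack inS true (ch :: acc)
    else if ch = '"' then pvBGo rest stack (!inS) esc (ch :: acc)
    else if inS then pvBGo rest stack inS esc (ch :: acc)
    else if ch = '{' ∨ ch = '[' then pvBGo rest (ch :: stack) inS esc (ch :: acc)
    else if ch = '}' ∨ ch = ']' then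
      match stack with
      | [] => pvBGo rest [] inS esc acc
      | o :: s' =>
        if (if o = '{' then '}' else ']') = ch then pvBGo rest s' inS esc (ch :: acc)
        else pvBGo rest (o :: s') inS esc acc
    else pvBGo rest stack inS esc (ch :: acc)

def remove_stray_brackets_py_alt (text : String) : String :=
  String.ofList (pvBGo text.toList [] false false [])

-- ===== PRECONDITION & SPEC =====
def Spec_remove_stray_brackets_py (text : String) (out : String) : Prop := out = remove_stray_brackets_py_alt text
instance (text : String) (out : String) : Decidable (Spec_remove_stray_brackets_py text out) := by unfold Spec_remove_stray_brackets_py; infer_instance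

-- ===== CLAIM (what is proved, stated in full; the proofs are below) =====
def Claim_equal_remove_stray_brackets_py : Prop := ∀ (text : String), Dom_remove_stray_brackets_py text → Spec_remove_stray_brackets_py text (remove_stray_brackets_py text)

-- ===== LEMMAS AND PROOFS =====

-- matched_closers only grows.
lemma pvAFirst_mono (tl : List Char) (l : List (Nat × Char)) :
    ∀ (stack : List Nat) (inS esc : Bool) (closers : PySem.Set Nat) (j : Nat),
      j ∈ closers → j ∈ pvAFirst tl l stack inS esc closers := by
  induction l with
  | nil => intro _ _ _ _ j h; simpa [pvAFirst] using h
  | cons p rest ih =>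
    obtain ⟨i, ch⟩ := p
    intro stack inS esc closers j h
    simp only [pvAFirst]
    split_ifs with h1 h2 h3 h4 h5 h6
    · exact ih _ _ _ _ _ h
    · exact ih _ _ _ _ _ h
    · exact ih _ _ _ _ _ h
    · exact ih _ _ _ _ _ h
    · exact ih _ _ _ _ _ h
    · cases stack with
      | nil => exact ih _ _ _ _ _ h
      | cons q s' =>
        simp only
        split_ifs <;> exact ih _ _ _ _ _ (by simp [PySem.Set.mem_add, h])
    · exact ih _ _ _ _ _ h

-- indices added by the first pass over pvEnumFrom n come from ≥ n.
lemma pvAFirst_bound (tl : List Char) (rest : List Char) :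
    ∀ (n : Nat) (stack : List Nat) (inS esc : Bool) (closers : PySem.Set Nat) (j : Nat),
      j ∈ pvAFirst tl (pvEnumFrom n rest) stack inS esc closers → j ∈ closers ∨ n ≤ j := by
  induction rest with
  | nil => intro n _ _ _ closers j h; left; simpa [pvEnumFrom, pvAFirst] using h
  | cons ch rest ih =>
    intro n stack inS esc closers j h
    have mono : ∀ m, n ≤ m → (j ∈ closers ∨ m ≤ j) → j ∈ closers ∨ n ≤ j := by
      rintro m hm (h' | h') <;> [exact Or.inl h'; exact Or.inr (le_trans hm h')]
    simp only [pvEnumFrom, pvAFirst] at h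
    split_ifs at h with h1 h2 h3 h4 h5 h6
    · exact mono _ (Nat.le_succ n) (ih _ _ _ _ _ _ h)
    · exact mono _ (Nat.le_succ n) (ih _ _ _ _ _ _ h)
    · exact mono _ (Nat.le_succ n) (ih _ _ _ _ _ _ h)
    · exact mono _ (Nat.le_succ n) (ih _ _ _ _ _ _ h)
    · exact mono _ (Nat.le_succ n) (ih _ _ _ _ _ _ h)
    · cases stack with
      | nil => exact mono _ (Nat.le_succ n) (ih _ _ _ _ _ _ h)
      | cons q s' =>
        simp only at h
        split_ifs at h <;>
          first
            | exact mono _ (Nat.le_succ n) (ih _ _ _ _ _ _ h)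
            | (rcases ih _ _ _ _ _ _ h with h' | h'
               · rcases (by simpa [PySem.Set.mem_add] using h' : j ∈ closers ∨ j = n) with h'' | h''
                 · exact Or.inl h''
                 · exact Or.inr (le_of_eq h''.symm)
               · exact Or.inr (le_trans (Nat.le_succ n) h'))
    · exact mono _ (Nat.le_succ n) (ih _ _ _ _ _ _ h)

-- The fused-pass correspondence: A's second pass with the FINAL matched_closers set
-- computes exactly B's single pass, given the stack correspondence and index bounds.
set_option maxHeartbeats 1600000 in
lemma pvFuse (tl : List Char) :
    ∀ (rest : List Char) (n : Nat) (stkA : List Nat) (inS esc : Bool)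
      (closers : PySem.Set Nat) (acc : List Char),
      tl.drop n = rest →
      (∀ j ∈ closers, j < n) →
      pvASecond (pvAFirst tl (pvEnumFrom n rest) stkA inS esc closers)
        (pvEnumFrom n rest) inS esc acc
        = pvBGo rest (stkA.map (fun p => tl.getD p ' ')) inS esc acc := by
  intro rest
  induction rest with
  | nil => intro n stkA inS esc closers acc _ _; simp [pvEnumFrom, pvAFirst, pvASecond, pvBGo]
  | cons ch rest ih =>
    intro n stkA inS esc closers acc hdrop hM
    have h0 : tl[n]? = some ch := by
      rw [show tl[n]? = (tl.drop n)[0]? by simp [List.getElem?_drop], hdrop]; rfl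
    have hget : tl.getD n ' ' = ch := by simp [List.getD, h0]
    have hdrop' : tl.drop (n + 1) = rest := by
      rw [← List.drop_drop, hdrop]; rfl
    have hM' : ∀ j ∈ closers, j < n + 1 := fun j h => Nat.lt_succ_of_lt (hM j h)
    simp only [pvEnumFrom, pvAFirst, pvASecond, pvBGo]
    by_cases h1 : esc = true
    · simp only [if_pos h1]; exact ih _ _ _ _ _ _ hdrop' hM'
    · simp only [if_neg h1]
      by_cases h2 : ch = '\\' ∧ inS = true
      · simp only [if_pos h2]; exact ih _ _ _ _ _ _ hdrop' hM'
      · simp only [if_neg h2]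
        by_cases h3 : ch = '"'
        · simp only [if_pos h3]; exact ih _ _ _ _ _ _ hdrop' hM'
        · simp only [if_neg h3]
          by_cases h4 : inS = true
          · simp only [if_pos h4]; exact ih _ _ _ _ _ _ hdrop' hM'
          · simp only [if_neg h4]
            by_cases h5 : ch = '{' ∨ ch = '['
            · -- opener: A pushes index n, B pushes the character ch = tl.getD n ' '
              have hnc : ¬(ch = '}' ∨ ch = ']') := by rcases h5 with rfl | rfl <;> decide
              simp only [if_pos h5,
                if_neg (show ¬((ch = '}' ∨ ch = ']') ∧
                  ¬n ∈ pvAFirst tl (pvEnumFrom (n + 1) rest) (n :: stkA) inS esc closers)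
                  from fun hc => hnc hc.1)]
              have := ih (n + 1) (n :: stkA) inS esc closers (ch :: acc) hdrop' hM'
              simpa [List.getD, h0] using this
            · simp only [if_neg h5]
              by_cases h6 : ch = '}' ∨ ch = ']'
              · simp only [if_pos h6]
                cases stkA with
                | nil =>
                  have hnot : n ∉ pvAFirst tl (pvEnumFrom (n + 1) rest) [] inS esc closers := by
                    intro hmem
                    rcases pvAFirst_bound tl rest _ _ _ _ _ _ hmem with h' | h'
                    · exact absurd (hM _ h') (lt_irrefl n)
                    · omega
                  simp only [List.map_nil]
                  have hskip := And.intro h6 hnot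
                  rw [if_pos hskip]
                  exact ih _ _ _ _ _ _ hdrop' hM' 
                | cons p s' =>
                  simp only [List.map_cons]
                  by_cases hmatch : ch = (if tl.getD p ' ' = '{' then '}' else ']')
                  · -- matched: A records index n as a matched closer, B pops and appends
                    rw [if_pos hmatch, if_pos hmatch.symm]
                    have hmemfinal : n ∈ pvAFirst tl (pvEnumFrom (n + 1) rest) s' inS esc
                        (PySem.Set.add closers n) :=
                      pvAFirst_mono tl _ _ _ _ _ _ (by simp [PySem.Set.mem_add])
                    have hskip : ¬((ch = '}' ∨ ch = ']') ∧
                        n ∉ pvAFirst tl (pvEnumFrom (n + 1) rest) s' inS esc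
                          (PySem.Set.add closers n)) := fun hc => hc.2 hmemfinal
                    rw [if_neg hskip]
                    have hMadd : ∀ j ∈ PySem.Set.add closers n, j < n + 1 := by
                      intro j hj
                      rcases (by simpa [PySem.Set.mem_add] using hj : j ∈ closers ∨ j = n) with
                        hj' | hj'
                      · exact Nat.lt_succ_of_lt (hM _ hj')
                      · omega
                    exact ih _ _ _ _ _ _ hdrop' hMadd
                  · -- mismatch: A pushes the opener back, both drop the stray closer
                    have hmatch' : ¬((if tl.getD p ' ' = '{' then '}' else ']') = ch) :=
                      fun he => hmatch he.symm
                    rw [if_neg hmatch, if_neg hmatch']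
                    have hnot : n ∉ pvAFirst tl (pvEnumFrom (n + 1) rest) (p :: s')
                        inS esc closers := by
                      intro hmem
                      rcases pvAFirst_bound tl rest _ _ _ _ _ _ hmem with h' | h'
                      · exact absurd (hM _ h') (lt_irrefl n)
                      · omega
                    have hskip := And.intro h6 hnot
                    rw [if_pos hskip]
                    exact ih _ _ _ _ _ _ hdrop' hM' 
              · -- ordinary character: everyone appends
                simp only [if_neg h6,
                  if_neg (show ¬((ch = '}' ∨ ch = ']') ∧
                    ¬n ∈ pvAFirst tl (pvEnumFrom (n + 1) rest) stkA inS esc closers)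
                    from fun hc => h6 hc.1)]
                exact ih _ _ _ _ _ _ hdrop' hM'

-- ===== VERDICT (by name: the statement is the Claim_ definition above) =====
theorem remove_stray_brackets_py_spec : Claim_equal_remove_stray_brackets_py := by
  intro text _
  unfold Spec_remove_stray_brackets_py remove_stray_brackets_py remove_stray_brackets_py_alt
  simp only
  rw [pvFuse text.toList text.toList 0 [] false false PySem.Set.empty [] rfl
    (by intro j h; simp [PySem.Set.empty] at h)]
  rfl
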